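-- pv_equiv track=rewrite | github.com/aravaca/realtime-train-protection-system | tasc/server.py | is_stair_pattern
-- ===== SOURCE A (Python) =====
-- from typing import Optional, List, Tuple
--
-- def is_stair_pattern(notches: List[int]) -> bool:
--     if len(notches) < 3:
--         return False
--
--     # # 첫 브레이크가 1 또는 2인지 확인
--     # first_brake_notch = next((n for n in notches if n > 0), None)
--     # if first_brake_notch not in (1, 2):
--     #     return False
--
--     peak_reached = False
--     prev = notches[0]
--
--     for cur in notches[1:]:
--         if not peak_reached:
--             if cur < prev:  # 내려가기 시작하면 피크 도달
--                 peak_reached = True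
--         else:
--             if cur > prev:  # 피크 이후 다시 올라가면 실패
--                 return False
--         prev = cur
--
--     # 마지막은 1로 끝나야 함
--     if notches[-1] != 1:
--         return False
--
--     return True
-- ===== SOURCE B (Python) =====
-- def is_stair_pattern(notches):
--     if len(notches) < 3 or notches[-1] != 1:
--         return False
--     signs = [(b > a) - (b < a) for a, b in zip(notches, notches[1:]) if b != a]
--     return all(x >= y for x, y in zip(signs, signs[1:]))
-- ===== Notes on version B (the rewrite author's own statement) =====
-- stated objective: alternative
-- what changed: Replaces A's stateful peak-flag pass by a build-then-check decomposition: derive the list of strict comparison signs between consecutive unequal elements and test that it is monotonically non-increasing.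
import Mathlib
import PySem

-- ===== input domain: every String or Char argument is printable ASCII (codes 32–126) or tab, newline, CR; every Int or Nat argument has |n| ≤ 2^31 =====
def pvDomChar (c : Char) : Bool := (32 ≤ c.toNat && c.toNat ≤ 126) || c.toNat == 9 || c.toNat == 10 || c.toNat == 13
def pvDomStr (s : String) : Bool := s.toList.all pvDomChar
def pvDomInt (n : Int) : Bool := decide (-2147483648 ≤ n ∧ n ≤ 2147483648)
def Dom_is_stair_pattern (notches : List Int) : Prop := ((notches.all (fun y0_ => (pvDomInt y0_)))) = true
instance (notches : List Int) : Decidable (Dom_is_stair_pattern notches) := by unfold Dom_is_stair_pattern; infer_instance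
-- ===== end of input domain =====

-- B replaces A's stateful peak-flag pass by a build-then-check decomposition (derived sign list, then a
-- non-increasing scan); same cost, no speed claim.

-- ===== PORT A =====
-- the for-loop over notches[1:] with state (prev, peak_reached); early 'return False' = result false
def aLoop (prev : Int) (peak : Bool) : List Int → Bool
  | [] => true
  | cur :: rest =>
    if peak = false then
      aLoop cur (if cur < prev then true else peak) rest
    else
      if cur > prev then false
      else aLoop cur peak rest

def is_stair_pattern (notches : List Int) : Bool :=
  if notches.length < 3 then false
  else
    match notches with
    | [] => false   -- unreachable: length ≥ 3
    | p :: rest =>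
      if aLoop p false rest then
        if (notches.getLast?.getD 0) ≠ 1 then false else true   -- notches[-1], nonempty here
      else false

-- ===== PORT B =====
-- signs of consecutive unequal pairs: (b > a) - (b < a) for a,b in zip(notches, notches[1:]) if b != a
def bSigns : List Int → List Int
  | a :: b :: rest =>
    if b ≠ a then ((if b > a then (1:Int) else 0) - (if b < a then 1 else 0)) :: bSigns (b :: rest)
    else bSigns (b :: rest)
  | _ => []

-- all(x >= y for x,y in zip(signs, signs[1:]))
def bNonInc : List Int → Bool
  | x :: y :: rest => (y ≤ x) && bNonInc (y :: rest)
  | _ => true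

def is_stair_pattern_alt (notches : List Int) : Bool :=
  if notches.length < 3 ∨ (notches.getLast?.getD 0) ≠ 1 then false
  else bNonInc (bSigns notches)

-- ===== PRECONDITION & SPEC =====
def Spec_is_stair_pattern (notches : List Int) (out : Bool) : Prop := out = is_stair_pattern_alt notches
instance (notches : List Int) (out : Bool) : Decidable (Spec_is_stair_pattern notches out) := by unfold Spec_is_stair_pattern; infer_instance

-- ===== CLAIM (what is proved, stated in full; the proofs are below) =====
def Claim_equal_is_stair_pattern : Prop := ∀ (notches : List Int), Dom_is_stair_pattern notches → Spec_is_stair_pattern notches (is_stair_pattern notches)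

-- ===== LEMMAS AND PROOFS =====

-- proof-only helper: every sign after the peak must be a fall
def allNeg : List Int → Bool
  | [] => true
  | x :: rest => (x < 0) && allNeg rest

theorem bSigns_mem : ∀ (l : List Int), ∀ x ∈ bSigns l, x = 1 ∨ x = -1 := by
  intro l
  induction l with
  | nil => intro x hx; simp [bSigns] at hx
  | cons a t ih =>
    cases t with
    | nil => intro x hx; simp [bSigns] at hx
    | cons b rest =>
      intro x hx
      simp only [bSigns] at hx
      split at hx
      · rcases List.mem_cons.mp hx with h | h
        · subst h; rename_i hne; rcases lt_or_gt_of_ne hne with h1 | h1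
          · right; simp [h1, not_lt.mpr (le_of_lt h1)]
          · left; simp [h1, not_lt.mpr (le_of_lt h1)]
        · exact ih x h
      · exact ih x hx

theorem nonInc_neg_cons : ∀ (l : List Int), (∀ x ∈ l, x = 1 ∨ x = -1) →
    bNonInc ((-1) :: l) = allNeg l := by
  intro l
  induction l with
  | nil => intro _; simp [bNonInc, allNeg]
  | cons x t ih =>
    intro h
    have hx := h x (List.mem_cons_self)
    have ht : ∀ y ∈ t, y = 1 ∨ y = -1 := fun y hy => h y (List.mem_cons_of_mem _ hy)
    rcases hx with h1 | h1 <;> subst h1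
    · simp [bNonInc, allNeg]
    · simp only [bNonInc, allNeg]
      have : bNonInc ((-1) :: t) = allNeg t := ih ht
      cases t with
      | nil => simp [bNonInc, allNeg]
      | cons y s =>
        simp only [bNonInc] at this ⊢
        simp [this]

theorem nonInc_one_cons : ∀ (l : List Int), (∀ x ∈ l, x = 1 ∨ x = -1) →
    bNonInc (1 :: l) = bNonInc l := by
  intro l hl
  cases l with
  | nil => rfl
  | cons x t =>
    have hx := hl x (List.mem_cons_self)
    simp only [bNonInc]
    rcases hx with h | h <;> subst h <;> simp

theorem aLoop_true : ∀ (rest : List Int) (prev : Int),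
    aLoop prev true rest = allNeg (bSigns (prev :: rest)) := by
  intro rest
  induction rest with
  | nil => intro prev; simp [aLoop, bSigns, allNeg]
  | cons cur t ih =>
    intro prev
    simp only [aLoop, bSigns]
    rcases lt_trichotomy cur prev with h | h | h
    · have hne : cur ≠ prev := ne_of_lt h
      simp [h, not_lt.mpr (le_of_lt h), hne, allNeg, ih]
    · subst h; simp [ih]
    · have hne : cur ≠ prev := ne_of_gt h
      simp [h, not_lt.mpr (le_of_lt h), hne, allNeg]

theorem aLoop_false : ∀ (rest : List Int) (prev : Int),
    aLoop prev false rest = bNonInc (bSigns (prev :: rest)) := by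
  intro rest
  induction rest with
  | nil => intro prev; simp [aLoop, bSigns, bNonInc]
  | cons cur t ih =>
    intro prev
    simp only [aLoop, bSigns]
    rcases lt_trichotomy cur prev with h | h | h
    · have hne : cur ≠ prev := ne_of_lt h
      simp only [h, if_true, hne, ne_eq, not_false_iff, not_lt.mpr (le_of_lt h), if_false]
      rw [aLoop_true t cur, show ((0:Int) - 1) = -1 by norm_num,
        nonInc_neg_cons _ (bSigns_mem _)]
    · subst h; simp [ih]
    · have hne : cur ≠ prev := ne_of_gt h
      simp only [hne, ne_eq, not_false_iff, if_true, not_lt.mpr (le_of_lt h), if_false]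
      rw [show ((if cur > prev then (1:Int) else 0) - 0) = 1 by simp [h],
        nonInc_one_cons _ (bSigns_mem _), ih]

-- ===== VERDICT (by name: the statement is the Claim_ definition above) =====
theorem is_stair_pattern_spec : Claim_equal_is_stair_pattern := by
  intro notches _
  unfold Spec_is_stair_pattern is_stair_pattern is_stair_pattern_alt
  by_cases hlen : notches.length < 3
  · simp [hlen]
  · cases notches with
    | nil => simp at hlen
    | cons p rest =>
      simp only [hlen, if_false]
      rw [aLoop_false rest p]
      by_cases hlast : ((p :: rest).getLast?.getD 0) ≠ 1
      · simp [hlast]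
      · simp only [not_not] at hlast
        simp [hlast]
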